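-- pv_equiv track=rewrite | github.com/Desead/swapers | app_market/services/stats.py | _limit_to_max_length
-- ===== SOURCE A (Python) =====
-- def _limit_to_max_length(value_list: list[str], max_len: int) -> str:
--     result, total = [], 0
--     for i, sym in enumerate(value_list):
--         chunk = (", " if i else "") + sym
--         if total + len(chunk) <= max_len:
--             result.append(sym)
--             total += len(chunk)
--         else:
--             break
--     return ", ".join(result)
-- ===== SOURCE B (Python) =====
-- def _limit_to_max_length(value_list: list[str], max_len: int) -> str:
--     # Build the table of joined-prefix lengths, then binary-search the cutoff.
--     prefix = []
--     total = 0
--     for i, s in enumerate(value_list):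
--         total += len(s) + (2 if i else 0)
--         prefix.append(total)
--     lo, hi = 0, len(prefix)
--     while lo < hi:
--         mid = (lo + hi) // 2
--         if prefix[mid] <= max_len:
--             lo = mid + 1
--         else:
--             hi = mid
--     return ", ".join(value_list[:lo])
-- ===== Notes on version B (the rewrite author's own statement) =====
-- stated objective: alternative
-- what changed: Replaces the scan-and-append greedy loop by a prefix-length table plus a binary search (bisect_right) for the cutoff index, followed by a single slice-join.
import Mathlib
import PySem

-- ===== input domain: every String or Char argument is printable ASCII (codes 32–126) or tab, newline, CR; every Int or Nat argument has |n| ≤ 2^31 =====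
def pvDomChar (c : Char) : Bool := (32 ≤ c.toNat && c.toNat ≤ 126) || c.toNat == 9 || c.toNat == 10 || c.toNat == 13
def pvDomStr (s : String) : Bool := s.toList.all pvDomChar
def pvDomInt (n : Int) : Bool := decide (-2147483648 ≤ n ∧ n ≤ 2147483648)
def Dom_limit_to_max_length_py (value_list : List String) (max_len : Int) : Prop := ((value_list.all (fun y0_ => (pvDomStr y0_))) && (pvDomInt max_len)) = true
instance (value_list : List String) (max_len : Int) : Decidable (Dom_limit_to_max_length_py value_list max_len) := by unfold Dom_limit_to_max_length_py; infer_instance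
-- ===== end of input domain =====

-- B replaces A's greedy scan-and-append loop by a prefix-length table plus a binary search
-- for the cutoff index, then a single slice-join (alternative decomposition, same cost).


-- ===== PORT A =====
-- the for-loop with break: state (i, total, result), stops at the first failing chunk
def limitA_loop (m : Int) : List String → Nat → Int → List String → List String
  | [], _, _, res => res
  | sym :: rest, i, total, res =>
    let chunk := (if i ≠ 0 then ", " else "") ++ sym
    if total + PySem.Str.len chunk ≤ m then
      limitA_loop m rest (i + 1) (total + PySem.Str.len chunk) (res ++ [sym])
    else res

def limit_to_max_length_py (value_list : List String) (max_len : Int) : String :=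
  PySem.Str.join ", " (limitA_loop max_len value_list 0 0 [])

-- ===== PORT B =====
-- the table-building loop of Source B (prefix joined lengths)
def buildPrefix : List String → Nat → Int → List Int
  | [], _, _ => []
  | s :: rest, i, total =>
    let t := total + PySem.Str.len s + (if i ≠ 0 then 2 else 0)
    t :: buildPrefix rest (i + 1) t

-- the while-loop binary search of Source B; prefix[mid] is always in range (lo ≤ mid < hi ≤ len),
-- so the Python indexing is ported as getD with an unreachable default
def bsearch (P : List Int) (m : Int) (lo hi : Nat) : Nat :=
  if _h : lo < hi then
    let mid := (lo + hi) / 2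
    if P.getD mid 0 ≤ m then bsearch P m (mid + 1) hi else bsearch P m lo mid
  else lo
termination_by hi - lo
decreasing_by all_goals omega

def limit_to_max_length_py_alt (value_list : List String) (max_len : Int) : String :=
  let pref := buildPrefix value_list 0 0
  let lo := bsearch pref max_len 0 pref.length
  PySem.Str.join ", " (value_list.take lo)

-- ===== PRECONDITION & SPEC =====
def Spec_limit_to_max_length_py (value_list : List String) (max_len : Int) (out : String) : Prop := out = limit_to_max_length_py_alt value_list max_len
instance (value_list : List String) (max_len : Int) (out : String) : Decidable (Spec_limit_to_max_length_py value_list max_len out) := by unfold Spec_limit_to_max_length_py; infer_instance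

-- ===== CLAIM (what is proved, stated in full; the proofs are below) =====
def Claim_equal_limit_to_max_length_py : Prop := ∀ (value_list : List String) (max_len : Int), Dom_limit_to_max_length_py value_list max_len → Spec_limit_to_max_length_py value_list max_len (limit_to_max_length_py value_list max_len)

-- ===== LEMMAS AND PROOFS =====

-- greedy count of leading prefix sums ≤ m (proof-only characterisation)
def cnt (P : List Int) (m : Int) : Nat :=
  match P with
  | [] => 0
  | x :: xs => if x ≤ m then cnt xs m + 1 else 0

theorem cnt_le_length (P : List Int) (m : Int) : cnt P m ≤ P.length := by
  induction P with
  | nil => simp [cnt]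
  | cons x xs ih => simp only [cnt, List.length_cons]; split <;> omega

theorem cnt_lt (P : List Int) (m : Int) (j : Nat) (h : j < cnt P m) : P.getD j 0 ≤ m := by
  induction P generalizing j with
  | nil => simp [cnt] at h
  | cons x xs ih =>
    simp only [cnt] at h
    split at h
    · cases j with
      | zero => simpa
      | succ k => simpa using ih k (by omega)
    · omega

theorem cnt_at (P : List Int) (m : Int) (h : cnt P m < P.length) : ¬ P.getD (cnt P m) 0 ≤ m := by
  induction P with
  | nil => simp at h
  | cons x xs ih =>
    by_cases hx : x ≤ m
    · simp only [cnt, if_pos hx, List.length_cons] at h ⊢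
      simpa using ih (by omega)
    · simp only [cnt, if_neg hx]
      simpa using hx

theorem len_chunk (i : Nat) (s : String) :
    PySem.Str.len ((if i ≠ 0 then ", " else "") ++ s) = PySem.Str.len s + (if i ≠ 0 then 2 else 0) := by
  by_cases h : i = 0
  · simp [h]
  · simp [h]; omega

theorem len_nonneg (s : String) : 0 ≤ PySem.Str.len s := by
  simp [PySem.Str.len_eq]

-- A's loop takes exactly the first (cnt of the prefix table) elements
theorem loopA_eq_take (m : Int) (l : List String) (i : Nat) (t : Int) (res : List String) :
    limitA_loop m l i t res = res ++ l.take (cnt (buildPrefix l i t) m) := by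
  induction l generalizing i t res with
  | nil => simp [limitA_loop]
  | cons s rest ih =>
    simp only [limitA_loop, len_chunk]
    have eassoc : t + (PySem.Str.len s + (if i ≠ 0 then 2 else 0))
        = t + PySem.Str.len s + (if i ≠ 0 then 2 else 0) := by ring
    rw [eassoc]
    have ecnt : cnt (buildPrefix (s :: rest) i t) m
        = if t + PySem.Str.len s + (if i ≠ 0 then 2 else 0) ≤ m
          then cnt (buildPrefix rest (i + 1) (t + PySem.Str.len s + (if i ≠ 0 then 2 else 0))) m + 1
          else 0 := rfl
    rw [ecnt]
    by_cases h : t + PySem.Str.len s + (if i ≠ 0 then 2 else 0) ≤ m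
    · rw [if_pos h, if_pos h, ih, List.take_succ_cons, List.append_assoc, List.singleton_append]
    · rw [if_neg h, if_neg h, List.take_zero, List.append_nil]

theorem mem_buildPrefix_ge (l : List String) (i : Nat) (t : Int) (x : Int)
    (hx : x ∈ buildPrefix l i t) : t ≤ x := by
  induction l generalizing i t with
  | nil => simp [buildPrefix] at hx
  | cons s rest ih =>
    simp only [buildPrefix, List.mem_cons] at hx
    have h2 : (0 : Int) ≤ (if i ≠ 0 then 2 else 0) := by split <;> omega
    have hl := len_nonneg s
    rcases hx with rfl | hx
    · omega
    · have := ih (i + 1) _ hx; omega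

theorem buildPrefix_adj (l : List String) (i : Nat) (t : Int) (j : Nat)
    (h : j + 1 < (buildPrefix l i t).length) :
    (buildPrefix l i t).getD j 0 ≤ (buildPrefix l i t).getD (j + 1) 0 := by
  induction l generalizing i t j with
  | nil => simp [buildPrefix] at h
  | cons s rest ih =>
    simp only [buildPrefix] at h ⊢
    cases j with
    | zero =>
      simp only [List.getD_cons_zero, List.getD_cons_succ]
      have hlen : 0 < (buildPrefix rest (i + 1) (t + PySem.Str.len s + (if i ≠ 0 then 2 else 0))).length := by
        simp only [List.length_cons] at h; omega
      exact mem_buildPrefix_ge _ _ _ _ (by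
        rw [List.getD_eq_getElem _ _ hlen]; exact List.getElem_mem _)
    | succ k =>
      simp only [List.getD_cons_succ]
      exact ih (i + 1) _ k (by simp only [List.length_cons] at h; omega)

theorem buildPrefix_mono (l : List String) (i : Nat) (t : Int) (a b : Nat)
    (hab : a ≤ b) (hb : b < (buildPrefix l i t).length) :
    (buildPrefix l i t).getD a 0 ≤ (buildPrefix l i t).getD b 0 := by
  induction b with
  | zero => cases Nat.le_zero.mp hab; exact le_refl _
  | succ k ih =>
    rcases Nat.lt_or_ge a (k + 1) with h | h
    · exact le_trans (ih (by omega) (by omega)) (buildPrefix_adj l i t k hb)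
    · have : a = k + 1 := by omega
      subst this; exact le_refl _

-- binary-search correctness for any list that is monotone under getD
theorem bsearch_eq (P : List Int) (m : Int)
    (hmono : ∀ a b, a ≤ b → b < P.length → P.getD a 0 ≤ P.getD b 0) :
    ∀ fuel lo hi, hi - lo ≤ fuel → lo ≤ cnt P m → cnt P m ≤ hi → hi ≤ P.length →
      bsearch P m lo hi = cnt P m := by
  intro fuel
  induction fuel with
  | zero =>
    intro lo hi h1 h2 h3 _
    rw [bsearch]
    have hlt : ¬ lo < hi := by omega
    simp only [hlt, dif_neg, not_false_iff]
    omega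
  | succ n ih =>
    intro lo hi h1 h2 h3 h4
    rw [bsearch]
    by_cases hlt : lo < hi
    · simp only [hlt, dif_pos]
      by_cases hcase : (lo + hi) / 2 < cnt P m
      · rw [if_pos (cnt_lt P m _ hcase)]
        exact ih ((lo + hi) / 2 + 1) hi (by omega) (by omega) h3 h4
      · have hKlen : cnt P m < P.length := by omega
        have hstep : P.getD (cnt P m) 0 ≤ P.getD ((lo + hi) / 2) 0 :=
          hmono _ _ (by omega) (by omega)
        rw [if_neg (fun hle => cnt_at P m hKlen (le_trans hstep hle))]
        exact ih lo ((lo + hi) / 2) (by omega) h2 (by omega) (by omega)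
    · simp only [hlt, dif_neg, not_false_iff]
      omega

-- ===== VERDICT (by name: the statement is the Claim_ definition above) =====
theorem limit_to_max_length_py_spec : Claim_equal_limit_to_max_length_py := by
  intro value_list max_len _
  unfold Spec_limit_to_max_length_py limit_to_max_length_py limit_to_max_length_py_alt
  show PySem.Str.join ", " (limitA_loop max_len value_list 0 0 [])
      = PySem.Str.join ", " (value_list.take
          (bsearch (buildPrefix value_list 0 0) max_len 0 (buildPrefix value_list 0 0).length))
  rw [loopA_eq_take, List.nil_append,
    bsearch_eq (buildPrefix value_list 0 0) max_len (buildPrefix_mono value_list 0 0)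
      (buildPrefix value_list 0 0).length 0 (buildPrefix value_list 0 0).length
      (by omega) (Nat.zero_le _) (cnt_le_length _ _) (le_refl _)]
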